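-- pv_equiv track=rewrite | github.com/KuznetsovKU/BootCamp_2023-01 | python/SortingTypes/Infrastructure.py | make_frequency_dict
-- ===== SOURCE A (Python) =====
-- def make_frequency_dict(input_array):
--     frequency_list = []
--     max_value = max(input_array)
--     min_value = min(input_array)
--     if min_value > 0:
--         min_value = 0
--     size = max_value + 1 - min_value
--     for i in range(size):
--         frequency_list.append(0)
--         for j in range(len(input_array)):
--             if input_array[j] == i + min_value:
--                 frequency_list[i] += 1
--     return frequency_list
-- ===== SOURCE B (Python) =====
-- def make_frequency_dict(input_array):
--     max_value = max(input_array)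
--     min_value = min(input_array)
--     if min_value > 0:
--         min_value = 0
--     size = max_value + 1 - min_value
--     counts = [0] * size
--     for v in input_array:
--         counts[v - min_value] += 1
--     return counts
-- ===== Notes on version B (the rewrite author's own statement) =====
-- stated objective: faster
-- what changed: A scans the whole array once per value in the range (nested loops); B allocates the count list once and makes a single pass over the array incrementing counts[v - min_value].
import Mathlib
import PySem

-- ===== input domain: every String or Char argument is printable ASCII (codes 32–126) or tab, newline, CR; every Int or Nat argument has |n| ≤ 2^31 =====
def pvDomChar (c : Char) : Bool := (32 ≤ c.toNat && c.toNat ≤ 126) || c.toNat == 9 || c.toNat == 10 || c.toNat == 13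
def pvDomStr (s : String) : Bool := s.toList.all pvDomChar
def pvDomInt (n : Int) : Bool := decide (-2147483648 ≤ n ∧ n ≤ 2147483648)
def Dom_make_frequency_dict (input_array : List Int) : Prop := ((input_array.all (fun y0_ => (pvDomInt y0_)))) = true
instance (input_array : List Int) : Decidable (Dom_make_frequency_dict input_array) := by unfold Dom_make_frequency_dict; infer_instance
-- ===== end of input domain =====

-- B replaces A's per-range-value scans of the array by one counting pass (counts[v - min] += 1); equal outputs proved on nonempty input.

-- ===== PORT A =====
def make_frequency_dict (input_array : List Int) : List Int :=
  let frequency_list : List Int := []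
  let max_value := (PySem.List.max? input_array (fun x => x)).getD 0
  let min_value0 := (PySem.List.min? input_array (fun x => x)).getD 0
  let min_value := if min_value0 > 0 then 0 else min_value0
  let size := max_value + 1 - min_value
  (PySem.List.pyRange 0 size 1).foldl (fun fl i =>
    let fl2 := fl ++ [0]
    (PySem.List.pyRange 0 (input_array.length : Int) 1).foldl
      (fun fl3 j =>
        if PySem.List.pyGetD input_array j 0 = i + min_value then
          PySem.List.pySetD fl3 i (PySem.List.pyGetD fl3 i 0 + 1)
        else fl3) fl2) frequency_list

-- ===== PORT B =====
def make_frequency_dict_alt (input_array : List Int) : List Int :=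
  let max_value := (PySem.List.max? input_array (fun x => x)).getD 0
  let min_value0 := (PySem.List.min? input_array (fun x => x)).getD 0
  let min_value := if min_value0 > 0 then 0 else min_value0
  let size := max_value + 1 - min_value
  input_array.foldl
    (fun counts v =>
      PySem.List.pySetD counts (v - min_value)
        (PySem.List.pyGetD counts (v - min_value) 0 + 1))
    (List.replicate size.toNat 0)

-- ===== PRECONDITION & SPEC =====
-- Pre_ excludes only the empty list: Python's max()/min() raise ValueError there (in A and in B alike).
def Pre_make_frequency_dict (input_array : List Int) : Prop := input_array ≠ []
instance (input_array : List Int) : Decidable (Pre_make_frequency_dict input_array) := by unfold Pre_make_frequency_dict; infer_instance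
def pvWitness_make_frequency_dict : List Int := [3, -1, 3, 0]

def Spec_make_frequency_dict (input_array : List Int) (out : List Int) : Prop := out = make_frequency_dict_alt input_array
instance (input_array : List Int) (out : List Int) : Decidable (Spec_make_frequency_dict input_array out) := by unfold Spec_make_frequency_dict; infer_instance

-- ===== CLAIM (what is proved, stated in full; the proofs are below) =====
def Claim_equal_make_frequency_dict : Prop := ∀ (input_array : List Int), Dom_make_frequency_dict input_array → Pre_make_frequency_dict input_array → Spec_make_frequency_dict input_array (make_frequency_dict input_array)

-- ===== LEMMAS AND PROOFS =====

lemma getD_set_self' (c : List Int) (i : Nat) (v : Int) (hi : i < c.length) :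
    (c.set i v).getD i 0 = v := by
  rw [List.getD_eq_getElem _ _ (by simpa using hi)]; simp

lemma getD_set_ne' (c : List Int) (i k : Nat) (v : Int) (hk : k < c.length) (hne : k ≠ i) :
    (c.set i v).getD k 0 = c.getD k 0 := by
  rw [List.getD_eq_getElem _ _ (by simpa using hk), List.getD_eq_getElem _ _ hk]
  exact List.getElem_set_ne (by omega) _

-- A's inner loop (fold over the array values, bumping slot i on a match) sets slot i to old value + count.
lemma innerA_eq_set (t : Int) (i : Nat) :
    ∀ (xs : List Int) (fl : List Int), i < fl.length →
      xs.foldl (fun fl3 v => if v = t then fl3.set i (fl3.getD i 0 + 1) else fl3) fl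
      = fl.set i (fl.getD i 0 + (xs.count t : Int)) := by
  intro xs
  induction xs with
  | nil =>
    intro fl hi
    simp only [List.foldl_nil, List.count_nil, Nat.cast_zero, add_zero]
    rw [List.getD_eq_getElem _ _ hi]
    exact (List.set_getElem_self hi).symm
  | cons v xs ih =>
    intro fl hi
    by_cases hv : v = t
    · rw [List.foldl_cons, if_pos hv, ih _ (by simpa using hi), List.set_set]
      rw [getD_set_self' fl i _ hi]
      subst hv
      rw [List.count_cons_self]
      push_cast; ring_nf
    · rw [List.foldl_cons, if_neg hv, ih fl hi]
      simp [hv]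

-- B's counting pass, characterised slot by slot.
lemma bfold_getD (m : Int) (xs : List Int) :
    ∀ (c : List Int), (∀ v ∈ xs, 0 ≤ v - m ∧ (v - m).toNat < c.length) →
      ((xs.foldl (fun counts v =>
          PySem.List.pySetD counts (v - m)
            (PySem.List.pyGetD counts (v - m) 0 + 1)) c).length = c.length
       ∧ ∀ k : Nat, k < c.length →
          (xs.foldl (fun counts v =>
            PySem.List.pySetD counts (v - m)
              (PySem.List.pyGetD counts (v - m) 0 + 1)) c).getD k 0
          = c.getD k 0 + (xs.count (m + (k : Int)) : Int)) := by
  induction xs with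
  | nil => intro c _; simp
  | cons v xs ih =>
    intro c hc
    obtain ⟨hv0, hvlt⟩ := hc v (by simp)
    have hset : PySem.List.pySetD c (v - m) (PySem.List.pyGetD c (v - m) 0 + 1)
        = c.set (v - m).toNat (c.getD (v - m).toNat 0 + 1) := by
      rw [PySem.List.pySetD_of_nonneg c _ hv0,
        PySem.List.pyGetD_eq_getElem c 0 hv0 (by exact_mod_cast (by omega : (v - m) < (c.length : Int))),
        List.getD_eq_getElem c 0 hvlt]
    simp only [List.foldl_cons, hset]
    have hlen : (c.set (v - m).toNat (c.getD (v - m).toNat 0 + 1)).length = c.length := by simp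
    obtain ⟨ihlen, ihget⟩ := ih (c.set (v - m).toNat (c.getD (v - m).toNat 0 + 1))
      (fun w hw => by rw [hlen]; exact hc w (by simp [hw]))
    refine ⟨by rw [ihlen, hlen], fun k hk => ?_⟩
    rw [ihget k (by rwa [hlen])]
    by_cases hkv : k = (v - m).toNat
    · subst hkv
      rw [getD_set_self' c _ _ hvlt]
      have hveq : v = m + ((v - m).toNat : Int) := by omega
      rw [← hveq, List.count_cons_self]
      push_cast; ring
    · rw [getD_set_ne' c _ k _ hk hkv]
      have hne : v ≠ m + (k : Int) := by omega
      simp [hne]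

-- A's whole computation equals the range-indexed count table.
lemma outerA_eq_map (xs : List Int) (m : Int) :
    ∀ (N : Nat),
      (PySem.List.pyRange 0 (N : Int) 1).foldl (fun fl i =>
        (PySem.List.pyRange 0 (xs.length : Int) 1).foldl
          (fun fl3 j =>
            if PySem.List.pyGetD xs j 0 = i + m then
              PySem.List.pySetD fl3 i (PySem.List.pyGetD fl3 i 0 + 1)
            else fl3) (fl ++ [0])) []
      = (List.range N).map (fun (k : Nat) => (List.count (m + (k : Int)) xs : Int)) := by
  intro N
  induction N with
  | zero => simp [PySem.List.pyRange_one_eq_nil]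
  | succ N ih =>
    have hsplit : PySem.List.pyRange 0 ((N + 1 : Nat) : Int) 1
        = PySem.List.pyRange 0 (N : Int) 1 ++ [(N : Int)] := by
      push_cast
      exact PySem.List.pyRange_one_succ_right (Int.natCast_nonneg N)
    rw [hsplit, List.foldl_append, ih]
    simp only [List.foldl_cons, List.foldl_nil]
    rw [PySem.List.foldl_pyRange_zero_pyGetD' xs 0
      (fun fl3 v =>
        if v = (N : Int) + m then
          PySem.List.pySetD fl3 (N : Int) (PySem.List.pyGetD fl3 (N : Int) 0 + 1)
        else fl3) _]
    simp only [PySem.List.pySetD_natCast, PySem.List.pyGetD_natCast]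
    rw [innerA_eq_set ((N : Int) + m) N xs _ (by simp)]
    have hP : (List.map (fun (k : Nat) => (List.count (m + (k : Int)) xs : Int)) (List.range N)).length = N := by
      simp
    have hgd : ((List.map (fun (k : Nat) => (List.count (m + (k : Int)) xs : Int)) (List.range N)) ++ [(0 : Int)]).getD N 0 = 0 := by
      rw [List.getD_eq_getElem _ _ (by simp [hP])]
      simp [List.getElem_append_right, hP]
    rw [hgd, List.range_succ, List.map_append, List.map_singleton]
    rw [List.set_append_right _ _ (by omega)]
    simp [hP, add_comm m (N : Int)]

-- ===== VERDICT (by name: the statement is the Claim_ definition above) =====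
theorem make_frequency_dict_spec : Claim_equal_make_frequency_dict := by
  intro xs _ hpre
  unfold Spec_make_frequency_dict make_frequency_dict make_frequency_dict_alt
  obtain ⟨mv, hmv⟩ : ∃ mv, PySem.List.max? xs (fun x => x) = some mv := by
    cases h : PySem.List.max? xs (fun x => x) with
    | none => exact absurd ((PySem.List.max?_eq_none_iff xs fun x => x).mp h) hpre
    | some mv => exact ⟨mv, rfl⟩
  obtain ⟨mn, hmn⟩ : ∃ mn, PySem.List.min? xs (fun x => x) = some mn := by
    cases h : PySem.List.min? xs (fun x => x) with
    | none => exact absurd ((PySem.List.min?_eq_none_iff xs fun x => x).mp h) hpre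
    | some mn => exact ⟨mn, rfl⟩
  simp only [hmv, hmn, Option.getD_some]
  set m : Int := if mn > 0 then 0 else mn with hm
  set size : Int := mv + 1 - m with hsize
  have hmax : ∀ v ∈ xs, v ≤ mv := PySem.List.max?_isMax hmv
  have hmin : ∀ v ∈ xs, mn ≤ v := PySem.List.min?_isMin hmn
  have hmle : ∀ v ∈ xs, m ≤ v := by
    intro v hv; have := hmin v hv
    rw [hm]; split_ifs with h <;> omega
  obtain ⟨x0, hx0⟩ : ∃ x, x ∈ xs := by
    cases xs with
    | nil => exact absurd rfl hpre
    | cons a t => exact ⟨a, by simp⟩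
  have hsizepos : 0 < size := by
    have h1 := hmle x0 hx0; have h2 := hmax x0 hx0; omega
  have hbounds : ∀ v ∈ xs, 0 ≤ v - m ∧ (v - m).toNat < (List.replicate size.toNat (0 : Int)).length := by
    intro v hv
    have h1 := hmle v hv; have h2 := hmax v hv
    refine ⟨by omega, ?_⟩
    rw [List.length_replicate]; omega
  obtain ⟨hlenB, hgetB⟩ := bfold_getD m xs (List.replicate size.toNat 0) hbounds
  have hcast : size = ((size.toNat : Nat) : Int) := by omega
  have hA : (PySem.List.pyRange 0 size 1).foldl (fun fl i =>
      (PySem.List.pyRange 0 (xs.length : Int) 1).foldl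
        (fun fl3 j =>
          if PySem.List.pyGetD xs j 0 = i + m then
            PySem.List.pySetD fl3 i (PySem.List.pyGetD fl3 i 0 + 1)
          else fl3) (fl ++ [0])) []
      = (List.range size.toNat).map (fun (k : Nat) => (List.count (m + (k : Int)) xs : Int)) := by
    rw [hcast]
    simp only [Int.toNat_natCast]
    exact outerA_eq_map xs m size.toNat
  rw [hA]
  apply List.ext_getElem
  · rw [List.length_map, List.length_range, hlenB, List.length_replicate]
  · intro k hk1 hk2
    have hk : k < size.toNat := by simpa using hk1
    have hgB := hgetB k (by simpa using hk)
    rw [List.getD_eq_getElem _ 0 hk2] at hgB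
    simp only [List.getElem_map, List.getElem_range]
    rw [hgB, List.getD_eq_getElem _ 0 (by simpa using hk)]
    simp
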